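-- pv_equiv track=rewrite | github.com/rundimecoteach/web3-ner-hlinyer | tp_Spacey.py | getGuessedName
-- ===== SOURCE A (Python) =====
-- from collections import Counter
--
-- def getGuessedName(items):
--     most_names = Counter(items).most_common(5)
--     names = []
--     mainName = ''
--     for item in most_names:
--         if item[0][1] == 'B' and mainName == '':
--             mainName = item[0][0]
--         else:
--             names.append(item[0][0])
--     return [mainName] + names
-- ===== SOURCE B (Python) =====
-- from collections import Counter
--
--
-- def splitMain(tagged):
--     # (main, other names) of a most_common list: main = name of the first
--     # 'B'-tagged entry ('' if none), others = the remaining names in order.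
--     if not tagged:
--         return ('', [])
--     head, tail = tagged[0], tagged[1:]
--     if head[0][1] == 'B':
--         return (head[0][0], [t[0][0] for t in tail])
--     main, others = splitMain(tail)
--     return (main, [head[0][0]] + others)
--
--
-- def getGuessedName(items):
--     top = Counter(items).most_common(5)
--     main, others = splitMain(top)
--     return [main] + others
-- ===== Notes on version B (the rewrite author's own statement) =====
-- stated objective: simpler
-- what changed: A threads a ('' -sentinel mainName, names accumulator) pair through one stateful loop over most_common(5); B instead splits the list recursively at the first 'B'-tagged entry (a pivot-split returning (main, other names)) with no mutable state.
-- outside the precondition, e.g. on getGuessedName([('', 'B'), ('x', 'B')]): A returns ['x'], B returns ['', 'x']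
import Mathlib
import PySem

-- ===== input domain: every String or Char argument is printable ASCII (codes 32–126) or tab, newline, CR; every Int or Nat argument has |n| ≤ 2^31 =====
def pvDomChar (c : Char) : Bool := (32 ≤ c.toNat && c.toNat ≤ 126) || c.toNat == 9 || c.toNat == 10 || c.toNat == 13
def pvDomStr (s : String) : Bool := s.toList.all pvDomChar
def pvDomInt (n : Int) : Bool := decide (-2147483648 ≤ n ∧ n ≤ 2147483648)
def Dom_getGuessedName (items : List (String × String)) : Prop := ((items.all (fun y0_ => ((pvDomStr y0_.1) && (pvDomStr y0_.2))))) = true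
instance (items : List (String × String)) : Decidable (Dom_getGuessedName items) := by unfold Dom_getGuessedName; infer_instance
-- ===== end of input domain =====

-- B replaces A's sentinel-state loop by a recursive pivot split at the first 'B'-tagged
-- entry (objective: simpler); return value only, neither version mutates its argument.

-- ===== PORT A =====
-- Counter(items).most_common(5) = the first 5 of the counter's items stably sorted by
-- count descending (CPython's documented tie rule: insertion = first-occurrence order).
def getGuessedName (items : List (String × String)) : List String :=
  let most_names := (PySem.List.sorted (PySem.Dict.counter items).items (fun p => p.2) true).take 5
  let st := most_names.foldl
      (fun (st : List String × String) item =>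
        if item.1.2 == "B" && st.2 == "" then (st.1, item.1.1)
        else (st.1 ++ [item.1.1], st.2))
      ([], "")
  [st.2] ++ st.1

-- ===== PORT B =====
-- splitMain(tagged) from Source B: recursion on the list, pivot at the first 'B'-tagged entry.
def splitMain : List ((String × String) × Int) → String × List String
  | [] => ("", [])
  | head :: tail =>
    if head.1.2 == "B" then (head.1.1, tail.map (fun t => t.1.1))
    else
      let r := splitMain tail
      (r.1, [head.1.1] ++ r.2)

def getGuessedName_alt (items : List (String × String)) : List String :=
  let top := (PySem.List.sorted (PySem.Dict.counter items).items (fun p => p.2) true).take 5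
  let r := splitMain top
  [r.1] ++ r.2

-- ===== PRECONDITION & SPEC =====
-- Pre_ excludes lists containing the pair ("", "B"): an empty guessed name collides with
-- A's empty-string sentinel for "no main name yet", so whether that entry is dropped and
-- which 'B' entry becomes the main name is accidental there; B takes the first 'B' entry.
def Pre_getGuessedName (items : List (String × String)) : Prop := ("", "B") ∉ items
instance (items : List (String × String)) : Decidable (Pre_getGuessedName items) := by unfold Pre_getGuessedName; infer_instance
def pvWitness_getGuessedName : (List (String × String)) := [("alice", "B"), ("token", "C")]

def Spec_getGuessedName (items : List (String × String)) (out : List String) : Prop := out = getGuessedName_alt items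
instance (items : List (String × String)) (out : List String) : Decidable (Spec_getGuessedName items out) := by unfold Spec_getGuessedName; infer_instance

-- ===== CLAIM (what is proved, stated in full; the proofs are below) =====
def Claim_equal_getGuessedName : Prop := ∀ (items : List (String × String)), Dom_getGuessedName items → Pre_getGuessedName items → Spec_getGuessedName items (getGuessedName items)

-- ===== LEMMAS AND PROOFS =====

-- Once mainName is nonempty, A's loop only appends the remaining names.
theorem foldl_step_of_ne (l : List ((String × String) × Int)) (ns : List String) (m : String)
    (hm : m ≠ "") :
    l.foldl (fun (st : List String × String) item =>
        if item.1.2 == "B" && st.2 == "" then (st.1, item.1.1)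
        else (st.1 ++ [item.1.1], st.2)) (ns, m)
      = (ns ++ l.map (fun t => t.1.1), m) := by
  induction l generalizing ns with
  | nil => simp
  | cons h t ih =>
    rw [List.foldl_cons, if_neg (by simp [hm])]
    rw [ih]
    simp

-- A's loop from the sentinel state computes B's pivot split, provided no 'B'-tagged
-- entry of the list carries an empty name.
theorem foldl_step_eq_splitMain (l : List ((String × String) × Int))
    (hB : ∀ t ∈ l, t.1.2 = "B" → t.1.1 ≠ "") (ns : List String) :
    l.foldl (fun (st : List String × String) item =>
        if item.1.2 == "B" && st.2 == "" then (st.1, item.1.1)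
        else (st.1 ++ [item.1.1], st.2)) (ns, "")
      = (ns ++ (splitMain l).2, (splitMain l).1) := by
  induction l generalizing ns with
  | nil => simp [splitMain]
  | cons h t ih =>
    by_cases hb : h.1.2 = "B"
    · have hne : h.1.1 ≠ "" := hB h (List.mem_cons_self) hb
      rw [List.foldl_cons, if_pos (by simp [hb])]
      rw [foldl_step_of_ne t ns h.1.1 hne]
      simp [splitMain, hb]
    · rw [List.foldl_cons, if_neg (by simp [hb])]
      rw [ih (fun u hu => hB u (List.mem_cons_of_mem _ hu))]
      simp [splitMain, hb]

-- Every entry of most_common(5) has its key among the input pairs.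
theorem fst_mem_of_mem_top (items : List (String × String)) (t : (String × String) × Int)
    (ht : t ∈ (PySem.List.sorted (PySem.Dict.counter items).items (fun p => p.2) true).take 5) :
    t.1 ∈ items := by
  have h1 : t ∈ PySem.List.sorted (PySem.Dict.counter items).items (fun p => p.2) true :=
    List.mem_of_mem_take ht
  have h2 : t ∈ (PySem.Dict.counter items).items := (PySem.List.mem_sorted _ _ _ _).1 h1
  rw [PySem.Dict.items_counter] at h2
  rcases List.mem_map.1 h2 with ⟨k, hk, hkt⟩
  have : t.1 = k := by rw [← hkt]
  rw [this]
  exact (PySem.Set.mem_ofList _ _).1 hk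

-- ===== VERDICT (by name: the statement is the Claim_ definition above) =====
theorem getGuessedName_spec : Claim_equal_getGuessedName := by
  intro items _ hpre
  unfold Spec_getGuessedName
  simp only [getGuessedName, getGuessedName_alt]
  have hB : ∀ t ∈ (PySem.List.sorted (PySem.Dict.counter items).items (fun p => p.2) true).take 5,
      t.1.2 = "B" → t.1.1 ≠ "" := by
    intro t ht htag hname
    apply hpre
    have hmem := fst_mem_of_mem_top items t ht
    have : t.1 = ("", "B") := by
      cases hp : t.1 with
      | mk a b =>
        rw [hp] at htag hname
        simp at htag hname
        rw [htag, hname]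
    rwa [this] at hmem
  rw [foldl_step_eq_splitMain _ hB []]
  simp
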